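-- pv_equiv track=rewrite | github.com/arsamigullin/problem_solving_python | leet/google/strings_and_arrays/find_and_replace_pattern.py | findAndReplacePattern
-- ===== SOURCE A (Python) =====
-- def findAndReplacePattern(words, pattern):
--     res = []
--     for word in words:
--         found = True
--         m1, m2 = {}, {}
--         for w, p in zip(word, pattern):
--             if w not in m1: m1[w] = p
--             if p not in m2: m2[p] = w
--             if (m1[w], m2[p]) != (p, w):
--                 found = False
--                 break
--         if found:
--             res.append(word)
--     return res
-- ===== SOURCE B (Python) =====
-- def findAndReplacePattern(words, pattern):
--     return [w for w in words
--             if all(w.index(a) == pattern.index(b) for a, b in zip(w, pattern))]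
-- ===== Notes on version B (the rewrite author's own statement) =====
-- stated objective: idiomatic
-- what changed: Replaces A's explicit loop maintaining two consistency dicts per word with the idiomatic one-liner that compares first-occurrence indices (str.index) of each paired character of word and pattern.
import Mathlib
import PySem

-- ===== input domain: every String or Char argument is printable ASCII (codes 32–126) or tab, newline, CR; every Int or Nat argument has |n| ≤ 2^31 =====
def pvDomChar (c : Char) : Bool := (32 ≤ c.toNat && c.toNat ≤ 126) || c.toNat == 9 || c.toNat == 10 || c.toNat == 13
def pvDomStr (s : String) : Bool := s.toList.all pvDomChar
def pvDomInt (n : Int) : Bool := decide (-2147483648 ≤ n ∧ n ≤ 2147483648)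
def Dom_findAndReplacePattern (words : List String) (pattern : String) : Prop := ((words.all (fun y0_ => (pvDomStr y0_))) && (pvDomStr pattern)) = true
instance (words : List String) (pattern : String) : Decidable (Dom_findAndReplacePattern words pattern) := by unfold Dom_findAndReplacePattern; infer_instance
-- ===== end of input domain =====

-- B replaces A's per-word twin-dict bijection check by the idiomatic one-liner comparing
-- first-occurrence indices (str.index) of paired characters.

-- ===== PORT A =====
-- inner loop of A: over zip(word, pattern) with the two dicts m1, m2; returns 'found'
def pvALoop : List (Char × Char) → PySem.Dict Char Char → PySem.Dict Char Char → Bool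
  | [], _, _ => true
  | (w, p) :: rest, m1, m2 =>
      let m1' := if m1.contains w then m1 else m1.insert w p     -- if w not in m1: m1[w] = p
      let m2' := if m2.contains p then m2 else m2.insert p w     -- if p not in m2: m2[p] = w
      if m1'.get? w == some p && m2'.get? p == some w            -- (m1[w], m2[p]) != (p, w) → break
        then pvALoop rest m1' m2'
        else false

def findAndReplacePattern (words : List String) (pattern : String) : List String :=
  words.foldl (fun res word =>
    if pvALoop (word.toList.zip pattern.toList) PySem.Dict.empty PySem.Dict.empty
      then res ++ [word] else res) []

-- ===== PORT B =====
-- s.index(c): at every call site c is a character drawn from s itself, so Python's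
-- str.index cannot raise; the none branch is unreachable there.
def pvIdx (s : List Char) (c : Char) : Int :=
  match PySem.List.index? s c with
  | some i => (i : Int)
  | none => 0

def findAndReplacePattern_alt (words : List String) (pattern : String) : List String :=
  words.filter (fun w =>
    (w.toList.zip pattern.toList).all
      (fun ab => pvIdx w.toList ab.1 == pvIdx pattern.toList ab.2))

-- ===== PRECONDITION & SPEC =====
def Spec_findAndReplacePattern (words : List String) (pattern : String) (out : List String) : Prop := out = findAndReplacePattern_alt words pattern
instance (words : List String) (pattern : String) (out : List String) : Decidable (Spec_findAndReplacePattern words pattern out) := by unfold Spec_findAndReplacePattern; infer_instance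

-- ===== CLAIM (what is proved, stated in full; the proofs are below) =====
def Claim_equal_findAndReplacePattern : Prop := ∀ (words : List String) (pattern : String), Dom_findAndReplacePattern words pattern → Spec_findAndReplacePattern words pattern (findAndReplacePattern words pattern)

-- ===== LEMMAS AND PROOFS =====

-- the common characterisation both loops are proved equal to: the list of character pairs
-- is (the graph of) a partial bijection
def pvCompat (M : List (Char × Char)) : Prop :=
  ∀ x ∈ M, ∀ y ∈ M, (x.1 = y.1 ↔ x.2 = y.2)

lemma pvCompat_middle_mem {P0 rest : List (Char × Char)} {x : Char × Char} (hx : x ∈ P0) :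
    pvCompat (P0 ++ x :: rest) ↔ pvCompat (P0 ++ rest) := by
  constructor
  · intro h a ha b hb
    refine h a ?_ b ?_ <;> simp only [List.mem_append, List.mem_cons] at * <;> tauto
  · intro h a ha b hb
    have ha' : a ∈ P0 ++ rest := by
      simp only [List.mem_append, List.mem_cons] at ha ⊢
      rcases ha with h1 | h1 | h1 <;> [exact Or.inl h1; exact Or.inl (h1 ▸ hx); exact Or.inr h1]
    have hb' : b ∈ P0 ++ rest := by
      simp only [List.mem_append, List.mem_cons] at hb ⊢
      rcases hb with h1 | h1 | h1 <;> [exact Or.inl h1; exact Or.inl (h1 ▸ hx); exact Or.inr h1]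
    exact h a ha' b hb'

lemma pvALoop_iff (L : List (Char × Char)) :
    ∀ (P0 : List (Char × Char)) (m1 m2 : PySem.Dict Char Char),
      pvCompat P0 →
      (∀ c d, m1.get? c = some d ↔ (c, d) ∈ P0) →
      (∀ c d, m2.get? d = some c ↔ (c, d) ∈ P0) →
      (pvALoop L m1 m2 = true ↔ pvCompat (P0 ++ L)) := by
  induction L with
  | nil => intro P0 m1 m2 hC _ _; simpa [pvALoop] using hC
  | cons pr rest ih =>
    obtain ⟨w, p⟩ := pr
    intro P0 m1 m2 hC h1 h2
    simp only [pvALoop]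
    cases hm1 : m1.get? w with
    | none =>
      have hc1 : m1.contains w = false := (PySem.Dict.get?_eq_none_iff_contains m1 w).mp hm1
      have hnw : ∀ d, (w, d) ∉ P0 := fun d hd => by
        rw [(h1 w d).mpr hd] at hm1; cases hm1
      cases hm2 : m2.get? p with
      | none =>
        -- both fresh: A records the pair and continues
        have hc2 : m2.contains p = false := (PySem.Dict.get?_eq_none_iff_contains m2 p).mp hm2
        have hnp : ∀ c, (c, p) ∉ P0 := fun c hc => by
          rw [(h2 c p).mpr hc] at hm2; cases hm2
        have hC' : pvCompat (P0 ++ [(w, p)]) := by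
          rintro ⟨x1, x2⟩ hx ⟨y1, y2⟩ hy
          simp only [List.mem_append, List.mem_singleton, Prod.mk.injEq] at hx hy ⊢
          rcases hx with hx | ⟨e1, e2⟩ <;> rcases hy with hy | ⟨f1, f2⟩
          · exact hC _ hx _ hy
          · subst f1; subst f2
            exact ⟨fun e => absurd (e ▸ hx) (hnw _), fun e => absurd (e ▸ hx) (hnp _)⟩
          · subst e1; subst e2
            exact ⟨fun e => absurd (e ▸ hy) (hnw _), fun e => absurd (e ▸ hy) (hnp _)⟩
          · subst e1; subst e2; subst f1; subst f2; simp
        have h1' : ∀ c d, (m1.insert w p).get? c = some d ↔ (c, d) ∈ P0 ++ [(w, p)] := by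
          intro c d
          rw [PySem.Dict.get?_insert]
          by_cases hcw : c = w
          · subst hcw
            simp only [if_true, List.mem_append, List.mem_singleton, Option.some_inj,
              Prod.mk.injEq, true_and]
            exact ⟨fun e => Or.inr e.symm, fun h => h.elim (fun h => absurd h (hnw d)) Eq.symm⟩
          · simp only [if_neg hcw, h1, List.mem_append, List.mem_singleton, Prod.mk.injEq]
            exact ⟨Or.inl, fun h => h.elim id (fun h => absurd h.1 hcw)⟩
        have h2' : ∀ c d, (m2.insert p w).get? d = some c ↔ (c, d) ∈ P0 ++ [(w, p)] := by
          intro c d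
          rw [PySem.Dict.get?_insert]
          by_cases hdp : d = p
          · subst hdp
            simp only [if_true, List.mem_append, List.mem_singleton, Option.some_inj,
              Prod.mk.injEq, and_true]
            exact ⟨fun e => Or.inr e.symm, fun h => h.elim (fun h => absurd h (hnp c)) Eq.symm⟩
          · simp only [if_neg hdp, h2, List.mem_append, List.mem_singleton, Prod.mk.injEq]
            exact ⟨Or.inl, fun h => h.elim id (fun h => absurd h.2 hdp)⟩
        simp only [hc1, hc2, if_false, Bool.false_eq_true, PySem.Dict.get?_insert_self,
          beq_self_eq_true, Bool.and_self, if_true]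
        rw [ih (P0 ++ [(w, p)]) _ _ hC' h1' h2']
        simp
      | some c =>
        -- p already matched to some c (≠ w): check fails
        have hcp : (c, p) ∈ P0 := (h2 c p).mp hm2
        have hcw : c ≠ w := fun e => hnw p (e ▸ hcp)
        have hc2 : m2.contains p = true := by
          rw [PySem.Dict.contains_eq_isSome_get?, hm2]; rfl
        have hcond : ((m1.insert w p).get? w == some p && m2.get? p == some w) = false := by
          rw [PySem.Dict.get?_insert_self, hm2]; simp [hcw]
        simp only [hc1, hc2, if_false, if_true, Bool.false_eq_true, hcond, false_iff]
        intro hcmp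
        have := hcmp (c, p) (by simp [hcp]) (w, p) (by simp)
        exact hcw (this.mpr rfl)
    | some d =>
      have hwd : (w, d) ∈ P0 := (h1 w d).mp hm1
      have hc1 : m1.contains w = true := by
        rw [PySem.Dict.contains_eq_isSome_get?, hm1]; rfl
      by_cases hdp : d = p
      · -- (w,p) already recorded: check passes, dicts unchanged
        subst hdp
        have hm2' : m2.get? d = some w := (h2 w d).mpr hwd
        have hc2 : m2.contains d = true := by
          rw [PySem.Dict.contains_eq_isSome_get?, hm2']; rfl
        simp only [hc1, hc2, if_true, hm1, hm2', beq_self_eq_true, Bool.and_self]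
        rw [ih P0 m1 m2 hC h1 h2]
        exact (pvCompat_middle_mem hwd).symm
      · -- w already matched to d ≠ p: check fails
        have : (some d == some p) = false := by simp [hdp]
        simp only [hc1, if_true, if_false, hm1, this, Bool.false_and, Bool.false_eq_true,
          false_iff]
        intro hcmp
        have := hcmp (w, d) (by simp [hwd]) (w, p) (by simp)
        exact hdp (this.mp rfl)

-- first-occurrence index facts for pvIdx
lemma pvIdx_spec {s : List Char} {k : Nat} (hk : k < s.length) :
    ∃ f, PySem.List.index? s s[k] = some f ∧ f ≤ k ∧
      ∃ hf : f < s.length, s[f] = s[k] ∧ ∀ j (hj : j < f), s[j] ≠ s[k] := by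
  have hmem : s[k] ∈ s := List.getElem_mem hk
  have hsome : (PySem.List.index? s s[k]).isSome := (PySem.List.index?_isSome_iff s s[k]).mpr hmem
  obtain ⟨f, hf⟩ := Option.isSome_iff_exists.mp hsome
  obtain ⟨hflt, hfeq, hmin⟩ := PySem.List.getElem_of_index?_eq_some hf
  refine ⟨f, hf, ?_, hflt, hfeq, hmin⟩
  by_contra hgt
  exact hmin k (by omega) rfl

lemma pvAll_iff (a b : List Char) :
    ((a.zip b).all (fun ab => pvIdx a ab.1 == pvIdx b ab.2) = true) ↔ pvCompat (a.zip b) := by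
  have hlen : (a.zip b).length = min a.length b.length := List.length_zip
  constructor
  · intro hall
    have hidx : ∀ k (hk : k < (a.zip b).length),
        pvIdx a (a[k]'(by omega)) = pvIdx b (b[k]'(by omega)) := by
      intro k hk
      have := List.all_eq_true.mp hall ((a.zip b)[k]) (List.getElem_mem hk)
      rw [List.getElem_zip] at this
      exact eq_of_beq this
    -- one direction of the pattern equivalence, used twice by symmetry
    have key : ∀ i j (hi : i < (a.zip b).length) (hj : j < (a.zip b).length),
        a[i]'(by omega) = a[j]'(by omega) → b[i]'(by omega) = b[j]'(by omega) := by
      intro i j hi hj hae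
      obtain ⟨fi, hfi, _, hfilt, hfieq, _⟩ := pvIdx_spec (show i < b.length by omega)
      obtain ⟨fj, hfj, _, hfjlt, hfjeq, _⟩ := pvIdx_spec (show j < b.length by omega)
      have e1 : pvIdx b b[i] = pvIdx b b[j] := by
        rw [← hidx i hi, ← hidx j hj, hae]
      simp only [pvIdx, hfi, hfj] at e1
      have hfe : fi = fj := by exact_mod_cast e1
      subst hfe
      rw [← hfieq]; exact hfjeq
    intro x hx y hy
    obtain ⟨i, hi, hxe⟩ := List.mem_iff_getElem.mp hx
    obtain ⟨j, hj, hye⟩ := List.mem_iff_getElem.mp hy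
    rw [← hxe, ← hye, List.getElem_zip, List.getElem_zip]
    show a[i]'(by omega) = a[j]'(by omega) ↔ b[i]'(by omega) = b[j]'(by omega)
    constructor
    · exact key i j hi hj
    · intro hbe
      -- symmetric argument on b: first indices in b equal forces first indices in a equal
      obtain ⟨fi, hfi, _, hfilt, hfieq, _⟩ := pvIdx_spec (show i < a.length by omega)
      obtain ⟨fj, hfj, _, hfjlt, hfjeq, _⟩ := pvIdx_spec (show j < a.length by omega)
      have e1 : pvIdx a a[i] = pvIdx a a[j] := by
        rw [hidx i hi, hidx j hj, hbe]
      simp only [pvIdx, hfi, hfj] at e1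
      have hfe : fi = fj := by exact_mod_cast e1
      subst hfe
      rw [← hfieq]; exact hfjeq
  · intro hC
    rw [List.all_eq_true]
    intro x hx
    obtain ⟨k, hk, hxe⟩ := List.mem_iff_getElem.mp hx
    rw [← hxe, List.getElem_zip]
    show (pvIdx a (a[k]'(by omega)) == pvIdx b (b[k]'(by omega))) = true
    obtain ⟨f, hf, hfk, hflt0, hfeq, hfmin⟩ := pvIdx_spec (show k < a.length by omega)
    obtain ⟨g, hg, hgk, hglt0, hgeq, hgmin⟩ := pvIdx_spec (show k < b.length by omega)
    have hfz : f < (a.zip b).length := by omega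
    have hgz : g < (a.zip b).length := by omega
    have hbf : b[f]'(by omega) = b[k]'(by omega) := by
      have := hC ((a.zip b)[f]) (List.getElem_mem hfz) ((a.zip b)[k]) (List.getElem_mem hk)
      rw [List.getElem_zip, List.getElem_zip] at this
      exact this.mp hfeq
    have hag : a[g]'(by omega) = a[k]'(by omega) := by
      have := hC ((a.zip b)[g]) (List.getElem_mem hgz) ((a.zip b)[k]) (List.getElem_mem hk)
      rw [List.getElem_zip, List.getElem_zip] at this
      exact this.mpr hgeq
    have hgf : g ≤ f := by
      by_contra h
      exact hgmin f (by omega) hbf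
    have hfg : f ≤ g := by
      by_contra h
      exact hfmin g (by omega) hag
    have : f = g := by omega
    simp only [pvIdx]
    rw [hf, hg, this]
    simp

-- ===== VERDICT (by name: the statement is the Claim_ definition above) =====
theorem findAndReplacePattern_spec : Claim_equal_findAndReplacePattern := by
  intro words pattern _
  unfold Spec_findAndReplacePattern findAndReplacePattern findAndReplacePattern_alt
  rw [PySem.List.foldl_append_if_eq_filter]
  simp only [List.nil_append]
  apply List.filter_congr
  intro w _
  apply Bool.eq_iff_iff.mpr
  rw [pvAll_iff]
  exact pvALoop_iff _ [] PySem.Dict.empty PySem.Dict.empty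
    (by intro x hx; cases hx)
    (by intro c d; simp [PySem.Dict.get?_empty])
    (by intro c d; simp [PySem.Dict.get?_empty])
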